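-- pv_equiv track=rewrite | github.com/gagiuntoli/AdventOfCode_Python | 2020/10.py | count
-- ===== SOURCE A (Python) =====
-- def count(L):
-- 	D = [0 for x in range(len(L))]
-- 	D[0] = 1
-- 	for i in range(1, len(L)):
-- 		c = 0
-- 		for j in range(0, i):
-- 			if abs(L[j] - L[i]) <= 3:
-- 				c += D[j]
-- 		D[i] = c
-- 	return D[len(L)-1]
--
-- L = [0, 1, 4, 5, 6, 7, 10, 11, 12, 15, 16, 19, 22]
-- ===== SOURCE B (Python) =====
-- def count(L):
--     # One pass: bucket path-counts by value; each new element sums the 7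
--     # possible predecessor values x-3..x+3 from a dict (O(n) vs A's O(n^2)).
--     if not L:
--         return 0
--     d = 1
--     S = {L[0]: 1}
--     for x in L[1:]:
--         d = sum(S.get(x + k, 0) for k in range(-3, 4))
--         S[x] = S.get(x, 0) + d
--     return d
-- ===== Notes on version B (the rewrite author's own statement) =====
-- stated objective: faster
-- what changed: Replaces A's quadratic DP (inner scan of all earlier indices per element) by a single pass that buckets accumulated path-counts by value in a dict, so each element sums just the 7 possible predecessor values x-3..x+3.
import Mathlib
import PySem

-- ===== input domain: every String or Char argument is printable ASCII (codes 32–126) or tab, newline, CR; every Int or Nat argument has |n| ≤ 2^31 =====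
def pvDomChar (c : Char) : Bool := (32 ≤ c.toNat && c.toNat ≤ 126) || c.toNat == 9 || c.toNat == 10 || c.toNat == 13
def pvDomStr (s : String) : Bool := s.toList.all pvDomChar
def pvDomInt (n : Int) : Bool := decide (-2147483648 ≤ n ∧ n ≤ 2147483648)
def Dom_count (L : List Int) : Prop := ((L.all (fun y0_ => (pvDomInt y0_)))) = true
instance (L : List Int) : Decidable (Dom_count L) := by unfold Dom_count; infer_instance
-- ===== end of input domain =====

-- B replaces A's quadratic inner scan by one pass that buckets path-counts by value in a
-- dict and sums the 7 possible predecessor values x-3..x+3 (objective: faster).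

-- ===== PORT A =====
def count (L : List Int) : Int :=
  let D : List Int := (List.range L.length).map (fun _ => (0 : Int))
  let D := PySem.List.pySetD D 0 1
  let D := (PySem.List.pyRange 1 (L.length : Int) 1).foldl (fun D i =>
      let c := (PySem.List.pyRange 0 i 1).foldl (fun c j =>
          if (PySem.List.pyGetD L j 0 - PySem.List.pyGetD L i 0).natAbs ≤ 3
          then c + PySem.List.pyGetD D j 0 else c) 0
      PySem.List.pySetD D i c) D
  PySem.List.pyGetD D ((L.length : Int) - 1) 0

-- ===== PORT B =====
def count_alt (L : List Int) : Int :=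
  match L with
  | [] => 0
  | x0 :: rest =>
    (rest.foldl (fun (st : Int × PySem.Dict Int Int) x =>
        let d := ((PySem.List.pyRange (-3) 4 1).map (fun k => st.2.getD (x + k) 0)).sum
        (d, st.2.insert x (st.2.getD x 0 + d)))
      (1, PySem.Dict.empty.insert x0 1)).1

-- ===== PRECONDITION & SPEC =====
-- Pre_ excludes only the empty list, on which A raises IndexError (D[0] = 1 on an empty D).
def Pre_count (L : List Int) : Prop := L ≠ []
instance (L : List Int) : Decidable (Pre_count L) := by unfold Pre_count; infer_instance
def pvWitness_count : List Int := [0, 1, 4, 5, 6, 7, 10]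

def Spec_count (L : List Int) (out : Int) : Prop := out = count_alt L
instance (L : List Int) (out : Int) : Decidable (Spec_count L out) := by unfold Spec_count; infer_instance

-- ===== CLAIM (what is proved, stated in full; the proofs are below) =====
def Claim_equal_count : Prop := ∀ (L : List Int), Dom_count L → Pre_count L → Spec_count L (count L)

-- ===== LEMMAS AND PROOFS =====

-- the DP value D[i] computed from the prefix list P (of length i) of earlier DP values
def step (L P : List Int) : Int :=
  ((List.range P.length).map (fun j =>
    if (L.getD j 0 - L.getD P.length 0).natAbs ≤ 3 then P.getD j 0 else 0)).sum

-- the list D[0..i] of A's DP values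
def Dp (L : List Int) : Nat → List Int
  | 0 => [1]
  | i+1 => Dp L i ++ [step L (Dp L i)]

theorem length_Dp (L : List Int) (i : Nat) : (Dp L i).length = i + 1 := by
  induction i with
  | zero => rfl
  | succ i ih => simp [Dp, ih]

-- entries of Dp are stable under extension
theorem getD_Dp_le (L : List Int) (i i' j : Nat) (h : i ≤ i') (hj : j ≤ i) :
    (Dp L i').getD j 0 = (Dp L i).getD j 0 := by
  induction h with
  | refl => rfl
  | step h' ih =>
    rename_i m
    rw [← ih]
    have hjm : j < (Dp L m).length := by rw [length_Dp]; exact Nat.lt_succ_of_le (le_trans hj h')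
    show (Dp L m ++ [step L (Dp L m)]).getD j 0 = _
    rw [List.getD_eq_getElem?_getD, List.getD_eq_getElem?_getD,
        List.getElem?_append_left hjm]

-- bucket L i v = sum of DP values D[j], j ≤ i, at positions with L[j] = v
def bucket (L : List Int) (i : Nat) (v : Int) : Int :=
  ((List.range (i+1)).map (fun j => if L.getD j 0 = v then (Dp L i).getD j 0 else 0)).sum

theorem seven (y x a : Int) :
    (if y = x + -3 then a else 0) + (if y = x + -2 then a else 0) + (if y = x + -1 then a else 0)
      + (if y = x + 0 then a else 0) + (if y = x + 1 then a else 0) + (if y = x + 2 then a else 0)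
      + (if y = x + 3 then a else 0)
      = if (y - x).natAbs ≤ 3 then a else 0 := by
  split_ifs <;> omega

theorem foldl_ite_add {α : Type} (l : List α) (P : α → Prop) [DecidablePred P]
    (g : α → Int) (a : Int) :
    l.foldl (fun c j => if P j then c + g j else c) a
      = a + (l.map (fun j => if P j then g j else 0)).sum := by
  have hf : (fun (c : Int) j => if P j then c + g j else c)
      = fun c j => c + (if P j then g j else 0) := by
    funext c j; split <;> simp
  rw [hf, PySem.List.foldl_add]

theorem inner_eq_step (L : List Int) (k : Nat)
    (D : List Int) (hD : ∀ j : Nat, j ≤ k → D.getD j 0 = (Dp L k).getD j 0) :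
    (PySem.List.pyRange 0 (1 + (k:Int)) 1).foldl (fun c j =>
        if (PySem.List.pyGetD L j 0 - PySem.List.pyGetD L (1 + (k:Int)) 0).natAbs ≤ 3
        then c + PySem.List.pyGetD D j 0 else c) 0
      = step L (Dp L k) := by
  have h1 : (1 + (k:Int)) = ((k+1 : Nat) : Int) := by push_cast; ring
  rw [h1, PySem.List.pyRange_zero_nat, List.foldl_map]
  simp only [PySem.List.pyGetD_natCast]
  rw [PySem.List.foldl_congr_mem _ _
      (fun c (j : Nat) => if (L.getD j 0 - L.getD (k+1) 0).natAbs ≤ 3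
        then c + (Dp L k).getD j 0 else c) _
      (by
        intro acc j hj
        rw [List.mem_range] at hj
        rw [hD j (by omega)])]
  rw [foldl_ite_add, zero_add]
  unfold step
  rw [length_Dp]

theorem A_loop (L : List Int) (k : Nat) (hL : 1 ≤ L.length) (hk : k ≤ L.length - 1) :
    (PySem.List.pyRange 1 (1 + (k:Int)) 1).foldl
      (fun D i => PySem.List.pySetD D i ((PySem.List.pyRange 0 i 1).foldl (fun c j =>
          if (PySem.List.pyGetD L j 0 - PySem.List.pyGetD L i 0).natAbs ≤ 3
          then c + PySem.List.pyGetD D j 0 else c) 0))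
      (1 :: List.replicate (L.length - 1) 0)
    = Dp L k ++ List.replicate (L.length - 1 - k) 0 := by
  induction k with
  | zero =>
    rw [PySem.List.pyRange_one_eq_nil (by norm_num)]
    simp [Dp]
  | succ k ih =>
    have hk' : k ≤ L.length - 1 := by omega
    have h1 : (1 + ((k+1:Nat):Int)) = (1 + (k:Int)) + 1 := by push_cast; ring
    rw [h1, PySem.List.pyRange_one_succ_right (by omega), List.foldl_append,
        ih hk']
    rw [List.foldl_cons, List.foldl_nil]
    -- state: pySetD (Dp L k ++ replicate (n-1-k) 0) (1+k) c
    rw [inner_eq_step L k _ (by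
      intro j hj
      rw [List.getD_eq_getElem?_getD, List.getD_eq_getElem?_getD,
          List.getElem?_append_left (by rw [length_Dp]; omega)])]
    rw [PySem.List.pySetD_of_nonneg _ _ (by omega)]
    have h2 : ((1:Int) + (k:Int)).toNat = k + 1 := by omega
    rw [h2, List.set_append]
    rw [length_Dp]
    simp only [Nat.lt_irrefl, Nat.sub_self]
    have h3 : L.length - 1 - k = (L.length - 1 - (k+1)) + 1 := by omega
    rw [h3, List.replicate_succ, List.set_cons_zero]
    show _ = (Dp L k ++ [step L (Dp L k)]) ++ _
    rw [List.append_assoc]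
    rfl

theorem Dp_top (L : List Int) (i : Nat) :
    (Dp L (i+1)).getD (i+1) 0 = step L (Dp L i) := by
  show (Dp L i ++ [step L (Dp L i)]).getD (i+1) 0 = _
  rw [List.getD_eq_getElem?_getD, List.getElem?_append_right (by rw [length_Dp])]
  simp [length_Dp]

theorem bucket_window (L : List Int) (i : Nat) (x : Int) :
    ((PySem.List.pyRange (-3) 4 1).map (fun k => bucket L i (x + k))).sum
      = ((List.range (i+1)).map (fun j =>
          if (L.getD j 0 - x).natAbs ≤ 3 then (Dp L i).getD j 0 else 0)).sum := by
  have hr : PySem.List.pyRange (-3) 4 1 = [-3, -2, -1, 0, 1, 2, 3] := by decide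
  rw [hr]
  simp only [List.map_cons, List.map_nil, List.sum_cons, List.sum_nil, bucket, add_zero]
  induction (List.range (i+1)) with
  | nil => simp
  | cons j R ih =>
    simp only [List.map_cons, List.sum_cons]
    have h7 := seven (L.getD j 0) x ((Dp L i).getD j 0)
    simp only [add_zero] at h7
    linarith [h7, ih]

theorem bucket_succ (L : List Int) (i : Nat) (v : Int) :
    bucket L (i+1) v
      = bucket L i v + (if L.getD (i+1) 0 = v then (Dp L (i+1)).getD (i+1) 0 else 0) := by
  unfold bucket
  rw [List.range_succ (n := i+1), List.map_append, List.sum_append]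
  congr 1
  · congr 1
    apply List.map_congr_left
    intro j hj
    rw [List.mem_range] at hj
    rw [getD_Dp_le L i (i+1) j (by omega) (by omega)]
  · simp

theorem B_loop (x0 : Int) (rest : List Int) (i : Nat) (hi : i ≤ rest.length) :
    ((rest.take i).foldl (fun (st : Int × PySem.Dict Int Int) x =>
        let d := ((PySem.List.pyRange (-3) 4 1).map (fun k => st.2.getD (x + k) 0)).sum
        (d, st.2.insert x (st.2.getD x 0 + d)))
      (1, PySem.Dict.empty.insert x0 1)).1 = (Dp (x0 :: rest) i).getD i 0
    ∧ ∀ v, ((rest.take i).foldl (fun (st : Int × PySem.Dict Int Int) x =>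
        let d := ((PySem.List.pyRange (-3) 4 1).map (fun k => st.2.getD (x + k) 0)).sum
        (d, st.2.insert x (st.2.getD x 0 + d)))
      (1, PySem.Dict.empty.insert x0 1)).2.getD v 0 = bucket (x0 :: rest) i v := by
  induction i with
  | zero =>
    refine ⟨by simp [Dp], fun v => ?_⟩
    simp only [List.take_zero, List.foldl_nil]
    rw [PySem.Dict.getD_insert]
    unfold bucket
    simp only [Nat.zero_add, List.range_one, List.map_cons, List.map_nil, List.sum_cons,
      List.sum_nil, add_zero, List.getD_cons_zero]
    by_cases hv : v = x0
    · subst hv; simp [Dp]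
    · rw [if_neg hv, if_neg (fun h => hv (Eq.symm h)), PySem.Dict.getD_empty]
  | succ i ih =>
    have hi' : i ≤ rest.length := by omega
    have hil : i < rest.length := by omega
    obtain ⟨ih1, ih2⟩ := ih hi'
    have htake : rest.take (i+1) = rest.take i ++ [rest[i]] := by
      rw [List.take_add_one, List.getElem?_eq_getElem hil]; rfl
    set F := (fun (st : Int × PySem.Dict Int Int) x =>
        let d := ((PySem.List.pyRange (-3) 4 1).map (fun k => st.2.getD (x + k) 0)).sum
        (d, st.2.insert x (st.2.getD x 0 + d))) with hF
    set st := (rest.take i).foldl F (1, PySem.Dict.empty.insert x0 1) with hst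
    have hLi : (x0 :: rest).getD (i+1) 0 = rest[i] := by
      simp [List.getD_eq_getElem?_getD, List.getElem?_eq_getElem hil]
    have hd : ((PySem.List.pyRange (-3) 4 1).map (fun k => st.2.getD (rest[i] + k) 0)).sum
        = (Dp (x0 :: rest) (i+1)).getD (i+1) 0 := by
      rw [Dp_top]
      have : ((PySem.List.pyRange (-3) 4 1).map (fun k => st.2.getD (rest[i] + k) 0)).sum
          = ((PySem.List.pyRange (-3) 4 1).map (fun k => bucket (x0 :: rest) i (rest[i] + k))).sum := by
        congr 1; apply List.map_congr_left; intro k _; rw [ih2]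
      rw [this, bucket_window]
      unfold step
      rw [length_Dp, hLi]
    rw [htake, List.foldl_append, List.foldl_cons, List.foldl_nil, ← hst]
    constructor
    · exact hd
    · intro v
      show (st.2.insert rest[i] (st.2.getD rest[i] 0 + _)).getD v 0 = _
      rw [PySem.Dict.getD_insert, bucket_succ, ih2 v, hLi]
      by_cases hv : v = rest[i]
      · subst hv; rw [if_pos rfl, if_pos rfl, ih2, hd]
      · rw [if_neg hv, if_neg (fun h => hv (Eq.symm h)), add_zero]

theorem count_A_eq (L : List Int) (h : L ≠ []) :
    count L = (Dp L (L.length - 1)).getD (L.length - 1) 0 := by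
  have hL : 1 ≤ L.length := List.length_pos_iff.mpr h
  simp only [count]
  have hD0 : PySem.List.pySetD ((List.range L.length).map fun _ => (0:Int)) 0 1
      = 1 :: List.replicate (L.length - 1) 0 := by
    rw [PySem.List.pySetD_of_nonneg _ _ (le_refl 0), List.map_const', List.length_range]
    have : L.length = (L.length - 1) + 1 := by omega
    rw [this, List.replicate_succ]
    rfl
  rw [hD0]
  have hn : (L.length : Int) = 1 + ((L.length - 1 : Nat) : Int) := by
    push_cast [Nat.cast_sub hL]; ring
  rw [hn, A_loop L (L.length - 1) hL (le_refl _)]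
  rw [Nat.sub_self, List.replicate_zero, List.append_nil]
  have : (1 + ((L.length - 1 : Nat) : Int)) - 1 = ((L.length - 1 : Nat) : Int) := by ring
  rw [this, PySem.List.pyGetD_natCast]

theorem count_B_eq (L : List Int) (h : L ≠ []) :
    count_alt L = (Dp L (L.length - 1)).getD (L.length - 1) 0 := by
  match L with
  | x0 :: rest =>
    have := (B_loop x0 rest rest.length (le_refl _)).1
    rw [List.take_length] at this
    simpa [count_alt] using this


-- ===== VERDICT (by name: the statement is the Claim_ definition above) =====
theorem count_spec : Claim_equal_count := by
  intro L _ hpre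
  unfold Spec_count
  rw [count_A_eq L hpre, count_B_eq L hpre]
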